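-- pv_equiv track=rewrite | github.com/Eduardo-zampirolli/projeto-1 | player.py | substituir_lista
-- ===== SOURCE A (Python) =====
-- def achar_substituir(lista, novo_item, velho_item):
--
--     '''Recebe um lista e troca todos os elementos dela de valor <velho_item> pelo valor <novo_item>, e retorna essa lista'''
--
--     for i in range(len(lista)):
--         if lista[i] == velho_item:
--             lista[i] = novo_item
--
--     return lista
--
-- def substituir_lista(lista1, lista2):
--     '''Recebe 2 listas e coloca em lista 1 os itens de lista2 que não estão em lista 1 '''
--
--     itens_diferentes = []
--     l2 = lista2.copy()
--
--     for i in range(len(lista1)):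
--         if lista1[i] not in l2:
--             itens_diferentes.append(lista1[i])
--         else:
--             l2.remove(lista1[i])
--
--     for item in itens_diferentes:
--         lista1 = achar_substituir(lista1, l2[0], item)
--         l2.pop(0)
--
--     return lista1
-- ===== SOURCE B (Python) =====
-- def substituir_lista(lista1, lista2):
--     '''Counter-based multiset matching plus one substitution dict and a single
--     replacement pass; O(n+m) instead of A's O(n*m). Returns the result without
--     mutating lista1 (A overwrites lista1 in place).'''
--     cnt = {}
--     for x in lista2:
--         cnt[x] = cnt.get(x, 0) + 1
--     matched = {}
--     diferentes = []
--     for x in lista1: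
--         if cnt.get(x, 0) > 0:
--             cnt[x] -= 1
--             matched[x] = matched.get(x, 0) + 1
--         else:
--             diferentes.append(x)
--     leftover = []
--     for x in lista2:
--         if matched.get(x, 0) > 0:
--             matched[x] -= 1
--         else:
--             leftover.append(x)
--     subst = {}
--     for old, new in zip(diferentes, leftover):
--         if old not in subst:
--             subst[old] = new
--     return [subst.get(x, x) for x in lista1]
-- ===== Notes on version B (the rewrite author's own statement) =====
-- stated objective: faster
-- what changed: Replaces A's quadratic passes (membership test + list.remove per element, then one full replace-all scan per unmatched item) by counter-based multiset matching, a leftover pass, and one substitution dict applied in a single map pass; B also does not mutate lista1, while A overwrites its cells in place.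
import Mathlib
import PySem

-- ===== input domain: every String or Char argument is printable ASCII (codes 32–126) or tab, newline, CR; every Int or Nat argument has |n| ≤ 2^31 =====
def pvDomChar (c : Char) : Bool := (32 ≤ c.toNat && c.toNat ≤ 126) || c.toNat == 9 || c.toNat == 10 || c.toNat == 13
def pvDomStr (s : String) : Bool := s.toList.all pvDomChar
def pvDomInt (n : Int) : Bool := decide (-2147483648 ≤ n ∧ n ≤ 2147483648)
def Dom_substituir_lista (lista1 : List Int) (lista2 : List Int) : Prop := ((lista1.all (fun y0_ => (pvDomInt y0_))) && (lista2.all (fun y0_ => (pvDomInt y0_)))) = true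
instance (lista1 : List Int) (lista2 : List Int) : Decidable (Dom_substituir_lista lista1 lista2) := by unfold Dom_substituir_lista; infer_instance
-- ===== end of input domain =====

-- B replaces A's quadratic membership/remove/replace passes by counter-based multiset
-- matching plus one substitution dict and a single map pass; equivalence is about the
-- RETURN value only (Python A overwrites lista1's cells in place, B does not mutate).

-- ===== PORT A =====
def achar_substituir (lista : List Int) (novo_item : Int) (velho_item : Int) : List Int :=
  lista.map (fun x => if x = velho_item then novo_item else x)

def pvStepA (st : List Int × List Int) (x : Int) : List Int × List Int :=
  if x ∉ st.2 then (st.1 ++ [x], st.2)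
  else (st.1, (PySem.List.remove? st.2 x).getD st.2)

def pvStepPop (st : List Int × List Int) (item : Int) : List Int × List Int :=
  match st.2 with
  | [] => (st.1, [])          -- Python raises IndexError on l2[0] here; Pre_ excludes these inputs
  | n :: t => (achar_substituir st.1 n item, t)

def substituir_lista (lista1 : List Int) (lista2 : List Int) : List Int :=
  let s := lista1.foldl pvStepA ([], lista2)
  (s.1.foldl pvStepPop (lista1, s.2)).1

-- ===== PORT B =====
def pvStepCount (d : PySem.Dict Int Int) (x : Int) : PySem.Dict Int Int :=
  d.insert x (d.getD x 0 + 1)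

def pvStepMatch (st : PySem.Dict Int Int × PySem.Dict Int Int × List Int) (x : Int) :
    PySem.Dict Int Int × PySem.Dict Int Int × List Int :=
  if 0 < st.1.getD x 0 then
    (st.1.insert x (st.1.getD x 0 - 1), st.2.1.insert x (st.2.1.getD x 0 + 1), st.2.2)
  else (st.1, st.2.1, st.2.2 ++ [x])

def pvStepLeft (st : PySem.Dict Int Int × List Int) (x : Int) : PySem.Dict Int Int × List Int :=
  if 0 < st.1.getD x 0 then (st.1.insert x (st.1.getD x 0 - 1), st.2)
  else (st.1, st.2 ++ [x])

def pvStepSub (d : PySem.Dict Int Int) (pr : Int × Int) : PySem.Dict Int Int :=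
  if d.contains pr.1 then d else d.insert pr.1 pr.2

def substituir_lista_alt (lista1 : List Int) (lista2 : List Int) : List Int :=
  let cnt0 := lista2.foldl pvStepCount PySem.Dict.empty
  let p := lista1.foldl pvStepMatch (cnt0, PySem.Dict.empty, [])
  let q := lista2.foldl pvStepLeft (p.2.1, [])
  let subst := (p.2.2.zip q.2).foldl pvStepSub PySem.Dict.empty
  lista1.map (fun x => subst.getD x x)

-- ===== PRECONDITION & SPEC =====
-- Python A raises IndexError (l2[0] on an exhausted l2) exactly when lista1 is longer than lista2.
def Pre_substituir_lista (lista1 : List Int) (lista2 : List Int) : Prop :=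
  lista1.length ≤ lista2.length
instance (lista1 : List Int) (lista2 : List Int) : Decidable (Pre_substituir_lista lista1 lista2) := by
  unfold Pre_substituir_lista; infer_instance

def pvWitness_substituir_lista : List Int × List Int := ([1], [2, 2])

def Spec_substituir_lista (lista1 : List Int) (lista2 : List Int) (out : List Int) : Prop :=
  out = substituir_lista_alt lista1 lista2
instance (lista1 : List Int) (lista2 : List Int) (out : List Int) : Decidable (Spec_substituir_lista lista1 lista2 out) := by
  unfold Spec_substituir_lista; infer_instance

-- ===== CLAIM (what is proved, stated in full; the proofs are below) =====
def Claim_equal_substituir_lista : Prop := ∀ (lista1 : List Int) (lista2 : List Int), Dom_substituir_lista lista1 lista2 → Pre_substituir_lista lista1 lista2 → Spec_substituir_lista lista1 lista2 (substituir_lista lista1 lista2)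


-- ===== LEMMAS AND PROOFS =====

-- Multiset of "first occurrences already removed", as a count function.
def pvInc (m : Int → Nat) (v : Int) : Int → Nat := fun x => if x = v then m x + 1 else m x
def pvDec (m : Int → Nat) (v : Int) : Int → Nat := fun x => if x = v then m x - 1 else m x

theorem pvInc_apply (m : Int → Nat) (v x : Int) : pvInc m v x = if x = v then m x + 1 else m x := rfl
theorem pvDec_apply (m : Int → Nat) (v x : Int) : pvDec m v x = if x = v then m x - 1 else m x := rfl

-- pvSkip m L drops, for each value v, the first (m v) occurrences of v in L.
def pvSkip : (Int → Nat) → List Int → List Int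
  | _, [] => []
  | m, x :: xs => if 0 < m x then pvSkip (pvDec m x) xs else x :: pvSkip m xs

theorem pvSkip_zero (L : List Int) : pvSkip (fun _ => 0) L = L := by
  induction L with
  | nil => rfl
  | cons x xs ih => simp [pvSkip, ih]

theorem pvCount_pvSkip (L : List Int) : ∀ (m : Int → Nat) (v : Int),
    (pvSkip m L).count v = L.count v - m v := by
  induction L with
  | nil => intro m v; simp [pvSkip]
  | cons x xs ih =>
    intro m v
    by_cases hx : 0 < m x
    · rw [pvSkip, if_pos hx, ih, pvDec_apply, List.count_cons]
      by_cases h : v = x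
      · subst h; simp only [beq_self_eq_true, if_true]; omega
      · simp only [if_neg h, beq_iff_eq, if_neg (Ne.symm h)]; omega
    · rw [pvSkip, if_neg hx, List.count_cons, List.count_cons, ih]
      by_cases h : v = x
      · subst h; simp only [beq_self_eq_true, if_true]; omega
      · simp only [beq_iff_eq, if_neg (Ne.symm h)]; omega

theorem pvMem_pvSkip (L : List Int) (m : Int → Nat) (v : Int) :
    v ∈ pvSkip m L ↔ m v < L.count v := by
  rw [← List.count_pos_iff, pvCount_pvSkip]; omega

theorem pvDec_pvInc_comm (m : Int → Nat) (v x : Int) (h : 0 < m x) :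
    pvDec (pvInc m v) x = pvInc (pvDec m x) v := by
  funext y
  by_cases h1 : y = x
  · subst h1
    simp only [pvDec_apply, pvInc_apply]
    split_ifs <;> omega
  · simp only [pvDec_apply, pvInc_apply, if_neg h1]

theorem pvRemove_pvSkip (L : List Int) : ∀ (m : Int → Nat) (v : Int), v ∈ pvSkip m L →
    PySem.List.remove? (pvSkip m L) v = some (pvSkip (pvInc m v) L) := by
  induction L with
  | nil => intro m v h; simp [pvSkip] at h
  | cons x xs ih =>
    intro m v h
    by_cases hx : 0 < m x
    · rw [pvSkip, if_pos hx] at h ⊢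
      have hx' : 0 < pvInc m v x := by rw [pvInc_apply]; split_ifs <;> omega
      rw [pvSkip, if_pos hx', pvDec_pvInc_comm m v x hx]
      exact ih (pvDec m x) v h
    · rw [pvSkip, if_neg hx] at h ⊢
      rcases eq_or_ne x v with hv | hv
      · subst hv
        have hx' : 0 < pvInc m x x := by rw [pvInc_apply]; simp
        rw [PySem.List.remove?_cons_self, pvSkip, if_pos hx']
        congr 1
        have hfun : pvDec (pvInc m x) x = m := by
          funext y
          rw [pvDec_apply, pvInc_apply]
          split_ifs with h1
          · subst h1; omega
          · rfl
        rw [hfun]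
      · rcases List.mem_cons.mp h with h1 | hmem
        · exact absurd h1 (Ne.symm hv)
        · have hx' : ¬ 0 < pvInc m v x := by rw [pvInc_apply, if_neg hv]; omega
          rw [PySem.List.remove?_cons_of_ne _ hv, ih m v hmem, pvSkip, if_neg hx']
          rfl

-- Phase 1: A's membership/remove pass and B's counter pass walk in lock step.
theorem pvPhase1 (l1 : List Int) : ∀ (L2 : List Int) (m : Int → Nat) (diff : List Int)
    (cnt matched : PySem.Dict Int Int),
    (∀ v, m v ≤ L2.count v) →
    (∀ v, cnt.getD v 0 = (L2.count v : Int) - (m v : Int)) →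
    (∀ v, matched.getD v 0 = (m v : Int)) →
    (∀ d ∈ diff, m d = L2.count d) →
    ∃ m' : Int → Nat,
      (∀ v, m' v ≤ L2.count v) ∧
      l1.foldl pvStepA (diff, pvSkip m L2)
        = ((l1.foldl pvStepMatch (cnt, matched, diff)).2.2, pvSkip m' L2) ∧
      (∀ v, (l1.foldl pvStepMatch (cnt, matched, diff)).2.1.getD v 0 = (m' v : Int)) ∧
      (∀ d ∈ (l1.foldl pvStepMatch (cnt, matched, diff)).2.2, m' d = L2.count d) := by
  induction l1 with
  | nil =>
    intro L2 m diff cnt matched hle hcnt hmat hdiff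
    exact ⟨m, hle, rfl, hmat, hdiff⟩
  | cons x xs ih =>
    intro L2 m diff cnt matched hle hcnt hmat hdiff
    simp only [List.foldl_cons]
    by_cases hx : m x < L2.count x
    · -- x is still available in l2: A removes its first occurrence, B decrements the counter
      have hmem : x ∈ pvSkip m L2 := (pvMem_pvSkip L2 m x).mpr hx
      have hA : pvStepA (diff, pvSkip m L2) x = (diff, pvSkip (pvInc m x) L2) := by
        have hnot : ¬ x ∉ pvSkip m L2 := not_not_intro hmem
        simp only [pvStepA]
        rw [if_neg hnot, pvRemove_pvSkip L2 m x hmem]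
        rfl
      have hpos : 0 < cnt.getD x 0 := by have := hcnt x; omega
      have hB : pvStepMatch (cnt, matched, diff) x
          = (cnt.insert x (cnt.getD x 0 - 1), matched.insert x (matched.getD x 0 + 1), diff) := by
        simp [pvStepMatch, hpos]
      rw [hA, hB]
      apply ih L2 (pvInc m x) diff
      · intro v; rw [pvInc_apply]; split_ifs with h
        · subst h; omega
        · exact hle v
      · intro v
        rw [PySem.Dict.getD_insert, pvInc_apply]
        split_ifs with h
        · subst h; have := hcnt v; push_cast; omega
        · exact hcnt v
      · intro v
        rw [PySem.Dict.getD_insert, pvInc_apply]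
        split_ifs with h
        · subst h; have := hmat v; push_cast; omega
        · exact hmat v
      · intro d hd
        have hne : d ≠ x := by
          intro h; subst h; have := hdiff d hd; omega
        rw [pvInc_apply, if_neg hne]
        exact hdiff d hd
    · -- x is exhausted: both sides append it to the "different items" list
      have hmem : x ∉ pvSkip m L2 := by rw [pvMem_pvSkip]; omega
      have hA : pvStepA (diff, pvSkip m L2) x = (diff ++ [x], pvSkip m L2) := by
        simp [pvStepA, hmem]
      have hpos : ¬ 0 < cnt.getD x 0 := by have := hcnt x; omega
      have hB : pvStepMatch (cnt, matched, diff) x = (cnt, matched, diff ++ [x]) := by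
        simp [pvStepMatch, hpos]
      rw [hA, hB]
      apply ih L2 m (diff ++ [x]) cnt matched hle hcnt hmat
      intro d hd
      rcases List.mem_append.mp hd with h | h
      · exact hdiff d h
      · have : d = x := by simpa using h
        subst this; have := hle d; omega

-- Phase 2: B's leftover pass over lista2 produces exactly pvSkip m lista2.
theorem pvPhase2 (L : List Int) : ∀ (d : PySem.Dict Int Int) (m : Int → Nat) (acc : List Int),
    (∀ v, d.getD v 0 = (m v : Int)) →
    (L.foldl pvStepLeft (d, acc)).2 = acc ++ pvSkip m L := by
  induction L with
  | nil => intro d m acc h; simp [pvSkip]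
  | cons x xs ih =>
    intro d m acc h
    simp only [List.foldl_cons]
    by_cases hx : 0 < m x
    · have hpos : 0 < d.getD x 0 := by rw [h x]; exact_mod_cast hx
      have : pvStepLeft (d, acc) x = (d.insert x (d.getD x 0 - 1), acc) := by
        simp [pvStepLeft, hpos]
      rw [this, pvSkip, if_pos hx]
      apply ih
      intro v
      rw [PySem.Dict.getD_insert, pvDec_apply]
      split_ifs with hv
      · subst hv; rw [h v]; omega
      · exact h v
    · have hpos : ¬ 0 < d.getD x 0 := by rw [h x]; exact_mod_cast hx
      have : pvStepLeft (d, acc) x = (d, acc ++ [x]) := by simp [pvStepLeft, hpos]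
      rw [this, pvSkip, if_neg hx, ih d m (acc ++ [x]) h]
      simp

theorem pvGetD_mem_values (d : PySem.Dict Int Int) (x : Int) (h : d.contains x = true) :
    d.getD x x ∈ d.values := by
  have hs : (d.get? x).isSome = true := by rw [← PySem.Dict.contains_eq_isSome_get?]; exact h
  obtain ⟨v, hv⟩ := Option.isSome_iff_exists.mp hs
  rw [PySem.Dict.getD_of_get?_eq_some d x hv]
  simp only [PySem.Dict.values]
  exact List.mem_map_of_mem (PySem.Dict.mem_items_of_get?_eq_some d hv)

-- Phase 3: A's repeated replace-all passes equal one map through the substitution dict.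
theorem pvPhase3 (D : List Int) : ∀ (L : List Int) (d : PySem.Dict Int Int) (l1 : List Int),
    (∀ it ∈ D, it ∉ L) →
    (∀ it ∈ D, ∀ w ∈ d.values, w ≠ it) →
    (D.foldl pvStepPop (l1.map (fun x => d.getD x x), L)).1
      = l1.map (fun x => ((D.zip L).foldl pvStepSub d).getD x x) := by
  induction D with
  | nil => intro L d l1 _ _; simp
  | cons it its ih =>
    intro L d l1 hnL hval
    match L with
    | [] =>
      simp only [List.foldl_cons, List.zip_nil_right]
      have : pvStepPop (l1.map (fun x => d.getD x x), []) it = (l1.map (fun x => d.getD x x), []) := rfl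
      rw [this]
      have := ih [] d l1 (fun i hi => by simp) (fun i hi w hw => hval i (List.mem_cons_of_mem _ hi) w hw)
      simpa using this
    | n :: t =>
      simp only [List.foldl_cons, List.zip_cons_cons]
      have hstep : pvStepPop (l1.map (fun x => d.getD x x), n :: t) it
          = (achar_substituir (l1.map (fun x => d.getD x x)) n it, t) := rfl
      rw [hstep]
      have hitL : it ∉ n :: t := hnL it (List.mem_cons_self ..)
      by_cases hc : d.contains it
      · -- duplicate "different item": the replace pass is a no-op and the dict keeps its entry
        have hnoop : achar_substituir (l1.map (fun x => d.getD x x)) n it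
            = l1.map (fun x => d.getD x x) := by
          unfold achar_substituir
          rw [List.map_map]
          apply List.map_congr_left
          intro x _
          simp only [Function.comp]
          have hne : d.getD x x ≠ it := by
            by_cases hcx : d.contains x
            · exact hval it (List.mem_cons_self ..) _ (pvGetD_mem_values d x hcx)
            · rw [PySem.Dict.getD_of_not_contains d x (by simpa using hcx)]
              intro h; subst h; exact hcx hc
          rw [if_neg hne]
        have hsub : pvStepSub d (it, n) = d := by simp [pvStepSub, hc]
        rw [hnoop, hsub]
        exact ih t d l1
          (fun i hi => fun h => hnL i (List.mem_cons_of_mem _ hi) (List.mem_cons_of_mem _ h))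
          (fun i hi w hw => hval i (List.mem_cons_of_mem _ hi) w hw)
      · -- fresh "different item": replace-all = inserting (it ↦ n) into the dict
        have hrepl : achar_substituir (l1.map (fun x => d.getD x x)) n it
            = l1.map (fun x => (d.insert it n).getD x x) := by
          unfold achar_substituir
          rw [List.map_map]
          apply List.map_congr_left
          intro x _
          simp only [Function.comp]
          rw [PySem.Dict.getD_insert]
          rcases eq_or_ne x it with h | h
          · subst h
            simp [PySem.Dict.getD_of_not_contains d _ (by simpa using hc)]
          · have hne : d.getD x x ≠ it := by
              by_cases hcx : d.contains x
              · exact hval it (List.mem_cons_self ..) _ (pvGetD_mem_values d x hcx)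
              · rw [PySem.Dict.getD_of_not_contains d x (by simpa using hcx)]; exact h
            rw [if_neg hne, if_neg h]
        have hsub : pvStepSub d (it, n) = d.insert it n := by simp [pvStepSub, hc]
        rw [hrepl, hsub]
        apply ih t (d.insert it n) l1
          (fun i hi => fun h => hnL i (List.mem_cons_of_mem _ hi) (List.mem_cons_of_mem _ h))
        intro i hi w hw
        rcases PySem.Dict.mem_values_insert _ _ _ _ hw with h | h
        · subst h
          intro h
          exact hnL i (List.mem_cons_of_mem _ hi) (by rw [← h]; exact List.mem_cons_self ..)
        · exact hval i (List.mem_cons_of_mem _ hi) w h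

theorem pvCnt0_getD (L : List Int) (v : Int) :
    (L.foldl pvStepCount PySem.Dict.empty).getD v 0 = (L.count v : Int) := by
  have h : (L.foldl (fun (d : PySem.Dict Int Int) x => d.insert x (d.getD x 0 + 1)) PySem.Dict.empty).getD v 0
      = PySem.Dict.empty.getD v 0 + L.count v := PySem.Dict.getD_foldl_insert_add_one L PySem.Dict.empty v
  simpa [PySem.Dict.getD_empty] using h

theorem pvMain (l1 l2 : List Int) : substituir_lista l1 l2 = substituir_lista_alt l1 l2 := by
  unfold substituir_lista substituir_lista_alt
  simp only []
  obtain ⟨m', hle, heq, hmat, hdiff⟩ :=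
    pvPhase1 l1 l2 (fun _ => 0) [] (l2.foldl pvStepCount PySem.Dict.empty) PySem.Dict.empty
      (fun v => Nat.zero_le _)
      (fun v => by rw [pvCnt0_getD]; simp)
      (fun v => by simp [PySem.Dict.getD_empty])
      (fun d hd => by simp at hd)
  rw [pvSkip_zero] at heq
  have hD : (l1.foldl pvStepA ([], l2)).1
      = (l1.foldl pvStepMatch (l2.foldl pvStepCount PySem.Dict.empty, PySem.Dict.empty, [])).2.2 := by
    rw [heq]
  have hL : (l1.foldl pvStepA ([], l2)).2 = pvSkip m' l2 := by rw [heq]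
  have hq : (l2.foldl pvStepLeft ((l1.foldl pvStepMatch
      (l2.foldl pvStepCount PySem.Dict.empty, PySem.Dict.empty, [])).2.1, [])).2
      = pvSkip m' l2 := by
    rw [pvPhase2 l2 _ m' [] hmat]; simp
  rw [hD, hL, hq]
  have hid : l1.map (fun x => PySem.Dict.empty.getD x x) = l1 := by
    simp [PySem.Dict.getD_empty]
  have h3 := pvPhase3
    ((l1.foldl pvStepMatch (l2.foldl pvStepCount PySem.Dict.empty, PySem.Dict.empty, [])).2.2)
    (pvSkip m' l2) PySem.Dict.empty l1
    (fun i hi => by rw [pvMem_pvSkip]; have := hdiff i hi; omega)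
    (fun i _ w hw => by simp [PySem.Dict.values, PySem.Dict.empty] at hw)
  rw [hid] at h3
  exact h3

-- ===== VERDICT (by name: the statement is the Claim_ definition above) =====
theorem substituir_lista_spec : Claim_equal_substituir_lista := by
  intro l1 l2 _ _
  unfold Spec_substituir_lista
  exact pvMain l1 l2
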